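-- pv_equiv track=rewrite | github.com/fahim-nion/problem-solving | recursion -2.py | task2E
-- ===== SOURCE A (Python) =====
-- def task2E(arr):
--   # res = 0
--   sum = 0
--   mul = 1
--   for i in range(len(arr)):
--     if arr[i] % 2 == 0:
--       sum += arr[i]
--     else:
--       mul *= arr[i]
--   return (mul - sum)
-- ===== SOURCE B (Python) =====
-- def task2E(arr):
--     # Divide and conquer: go(lo, hi) returns (sum of evens, product of odds)
--     # over arr[lo:hi]; halves are combined by (+, *).
--     def go(lo, hi):
--         if hi - lo == 0:
--             return (0, 1)
--         if hi - lo == 1: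
--             x = arr[lo]
--             return (x, 1) if x % 2 == 0 else (0, x)
--         mid = (lo + hi) // 2
--         s1, p1 = go(lo, mid)
--         s2, p2 = go(mid, hi)
--         return (s1 + s2, p1 * p2)
--     s, p = go(0, len(arr))
--     return p - s
-- ===== Notes on version B (the rewrite author's own statement) =====
-- stated objective: alternative
-- what changed: Replaced the single left-to-right accumulating loop by a recursive divide-and-conquer that splits the array in halves, computes (sum of evens, product of odds) for each half, and combines halves with (+, *); correct because both + and * are associative.
import Mathlib
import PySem

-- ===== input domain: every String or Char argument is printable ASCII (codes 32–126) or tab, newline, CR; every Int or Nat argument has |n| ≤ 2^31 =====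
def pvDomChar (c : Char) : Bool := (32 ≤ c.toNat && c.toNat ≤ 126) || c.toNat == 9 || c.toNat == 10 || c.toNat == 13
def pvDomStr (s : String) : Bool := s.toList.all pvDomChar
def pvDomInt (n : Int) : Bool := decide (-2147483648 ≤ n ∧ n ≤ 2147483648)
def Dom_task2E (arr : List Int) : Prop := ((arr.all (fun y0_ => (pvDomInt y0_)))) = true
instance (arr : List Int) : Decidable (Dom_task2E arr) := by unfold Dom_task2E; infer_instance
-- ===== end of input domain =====

-- ===== PORT A =====
-- Literal port of A: index loop over range(len(arr)) with running (sum, mul) accumulators.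
def task2ELoop (arr : List Int) : Int × Int :=
  (PySem.List.pyRange 0 arr.length 1).foldl
    (fun (p : Int × Int) i =>
      if PySem.Int.mod (PySem.List.pyGetD arr i 0) 2 = 0 then
        (p.1 + PySem.List.pyGetD arr i 0, p.2)
      else
        (p.1, p.2 * PySem.List.pyGetD arr i 0)) (0, 1)

def task2E (arr : List Int) : Int :=
  (task2ELoop arr).2 - (task2ELoop arr).1

-- ===== PORT B =====
-- B: divide and conquer; task2EGo l = (sum of evens, product of odds) of l,
-- computed by splitting l at its midpoint and combining halves with (+, *).
def task2EGo : List Int → Int × Int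
  | [] => (0, 1)
  | [x] => if PySem.Int.mod x 2 = 0 then (x, 1) else (0, x)
  | x :: y :: rest =>
      let l := x :: y :: rest
      let mid := l.length / 2
      let L := task2EGo (l.take mid)
      let R := task2EGo (l.drop mid)
      (L.1 + R.1, L.2 * R.2)
  termination_by l => l.length
  decreasing_by
    · simp only [List.length_take, List.length_cons]; omega
    · simp only [List.length_drop, List.length_cons]; omega

def task2E_alt (arr : List Int) : Int :=
  (task2EGo arr).2 - (task2EGo arr).1

-- ===== PRECONDITION & SPEC =====
def Spec_task2E (arr : List Int) (out : Int) : Prop := out = task2E_alt arr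
instance (arr : List Int) (out : Int) : Decidable (Spec_task2E arr out) := by unfold Spec_task2E; infer_instance

-- ===== CLAIM (what is proved, stated in full; the proofs are below) =====
def Claim_equal_task2E : Prop := ∀ (arr : List Int), Dom_task2E arr → Spec_task2E arr (task2E arr)

-- ===== LEMMAS AND PROOFS =====

-- ===== VERDICT (by name: the statement is the Claim_ definition above) =====
-- A's loop accumulates exactly (sum of evens, product of odds).
theorem task2E_loopA (arr : List Int) (s m : Int) :
    arr.foldl
      (fun (p : Int × Int) x =>
        if PySem.Int.mod x 2 = 0 then (p.1 + x, p.2) else (p.1, p.2 * x)) (s, m)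
      = (s + (arr.filter (fun x => PySem.Int.mod x 2 = 0)).sum,
         m * (arr.filter (fun x => PySem.Int.mod x 2 != 0)).prod) := by
  induction arr generalizing s m with
  | nil => simp
  | cons x xs ih =>
    simp only [List.foldl_cons, List.filter_cons]
    by_cases h : PySem.Int.mod x 2 = 0
    · rw [if_pos h, ih]
      simp only [h, decide_true, bne_self_eq_false, if_true, if_false,
        Bool.false_eq_true, List.sum_cons]
      ring_nf
    · rw [if_neg h, ih]
      simp only [decide_eq_true_eq, h, if_false, bne_iff_ne, ne_eq,
        not_false_eq_true, if_true, List.prod_cons]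
      ring_nf

-- B's divide-and-conquer computes the same pair as the filters.
theorem task2EGo_eq (l : List Int) :
    task2EGo l = ((l.filter (fun x => PySem.Int.mod x 2 = 0)).sum,
                  (l.filter (fun x => PySem.Int.mod x 2 != 0)).prod) := by
  induction hn : l.length using Nat.strong_induction_on generalizing l with
  | _ n ih =>
    match l with
    | [] => simp [task2EGo]
    | [x] =>
      rw [task2EGo]
      by_cases h : PySem.Int.mod x 2 = 0
      · rw [if_pos h, List.filter_singleton, List.filter_singleton]
        simp only [h, decide_true, cond_true, bne_self_eq_false, cond_false]
        simp
      · rw [if_neg h, List.filter_singleton, List.filter_singleton]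
        have hd : decide (PySem.Int.mod x 2 = 0) = false := by
          simp only [decide_eq_false_iff_not]; exact h
        have hb : (PySem.Int.mod x 2 != 0) = true := by
          simp only [bne_iff_ne, ne_eq]; exact h
        rw [hd, hb]
        simp
    | x :: y :: rest =>
      rw [task2EGo]
      have hlen : (x :: y :: rest).length = n := hn
      set l' := x :: y :: rest with hl'
      set mid := l'.length / 2 with hmid
      have htk : (l'.take mid).length < n := by
        simp only [List.length_take]; simp [hl'] at hlen ⊢; omega
      have hdr : (l'.drop mid).length < n := by
        simp only [List.length_drop]; simp [hl'] at hlen ⊢; omega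
      rw [ih _ htk _ rfl, ih _ hdr _ rfl]
      have hsplit : l'.take mid ++ l'.drop mid = l' := List.take_append_drop _ _
      conv_rhs => rw [← hsplit]
      rw [List.filter_append, List.filter_append, List.sum_append, List.prod_append]

theorem task2E_spec : Claim_equal_task2E := by
  intro arr _
  unfold Spec_task2E task2E task2ELoop task2E_alt
  rw [PySem.List.foldl_pyRange_zero_pyGetD' arr 0
      (fun (p : Int × Int) x =>
        if PySem.Int.mod x 2 = 0 then (p.1 + x, p.2) else (p.1, p.2 * x)) (0, 1)]
  rw [task2E_loopA, task2EGo_eq]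
  simp
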